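-- pv_equiv track=rewrite | github.com/JonathanHeyno/ot-harjoitustyo | src/entities/algorithms/valuebased.py | __get_highest_scores
-- ===== SOURCE A (Python) =====
-- def __get_highest_scores(size, scores):
--     highest_scores = []
--     max_score = -100
--     for x_coord in range(size):
--         for y_coord in range(size):
--             if scores[x_coord][y_coord] == max_score:
--                 highest_scores.append((x_coord, y_coord))
--             elif scores[x_coord][y_coord] > max_score:
--                 highest_scores = [(x_coord, y_coord)]
--                 max_score = scores[x_coord][y_coord]
--     return highest_scores
-- ===== SOURCE B (Python) =====
-- def __get_highest_scores(size, scores):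
--     coords = [(x, y) for x in range(size) for y in range(size)]
--     threshold = max([-100] + [scores[x][y] for (x, y) in coords])
--     return [(x, y) for (x, y) in coords if scores[x][y] == threshold]
-- ===== Notes on version B (the rewrite author's own statement) =====
-- stated objective: simpler
-- what changed: Replaces the single stateful sweep that keeps a running maximum and resets/extends the candidate list with two stateless passes: compute threshold = max(-100, grid maximum), then collect all coordinates equal to it in the same row-major order.
import Mathlib
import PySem

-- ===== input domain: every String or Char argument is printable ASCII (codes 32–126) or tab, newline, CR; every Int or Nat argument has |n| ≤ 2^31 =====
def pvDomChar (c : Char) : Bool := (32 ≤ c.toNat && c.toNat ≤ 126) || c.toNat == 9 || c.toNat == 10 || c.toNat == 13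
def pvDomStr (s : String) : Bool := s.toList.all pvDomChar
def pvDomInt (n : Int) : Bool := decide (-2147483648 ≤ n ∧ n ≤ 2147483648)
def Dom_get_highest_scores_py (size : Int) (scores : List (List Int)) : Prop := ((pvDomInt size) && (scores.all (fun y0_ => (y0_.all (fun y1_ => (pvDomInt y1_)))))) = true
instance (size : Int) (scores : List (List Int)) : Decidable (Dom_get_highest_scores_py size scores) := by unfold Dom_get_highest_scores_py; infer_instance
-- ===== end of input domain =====

-- B replaces A's single stateful sweep (running max, list reset/extend) by two stateless
-- passes: threshold = max(-100, grid max), then collect equal cells in the same order (objective: simpler).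

-- scores[x][y]; exact under Pre_ (both indices in range there)
def pvCell (scores : List (List Int)) (x y : Int) : Int :=
  PySem.List.pyGetD (PySem.List.pyGetD scores x []) y 0

-- ===== PORT A =====
def get_highest_scores_py (size : Int) (scores : List (List Int)) : List (Int × Int) :=
  ((PySem.List.pyRange 0 size 1).foldl (fun st x =>
    (PySem.List.pyRange 0 size 1).foldl (fun st y =>
      if pvCell scores x y = st.2 then (st.1 ++ [(x, y)], st.2)
      else if pvCell scores x y > st.2 then ([(x, y)], pvCell scores x y)
      else st) st)
    (([] : List (Int × Int)), (-100 : Int))).1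

-- ===== PORT B =====
def get_highest_scores_py_alt (size : Int) (scores : List (List Int)) : List (Int × Int) :=
  let coords := (PySem.List.pyRange 0 size 1).flatMap (fun x =>
    (PySem.List.pyRange 0 size 1).map (fun y => (x, y)))
  let threshold := (coords.map (fun c => pvCell scores c.1 c.2)).foldl max (-100)
  coords.filter (fun c => pvCell scores c.1 c.2 = threshold)

-- ===== PRECONDITION & SPEC =====
-- Pre_ excludes exactly the inputs where Python A raises IndexError: some x < size with
-- row x missing, or some row among the first size rows shorter than size.
def Pre_get_highest_scores_py (size : Int) (scores : List (List Int)) : Prop :=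
  size ≤ (scores.length : Int) ∧ ∀ row ∈ scores.take size.toNat, size ≤ (row.length : Int)
instance (size : Int) (scores : List (List Int)) : Decidable (Pre_get_highest_scores_py size scores) := by unfold Pre_get_highest_scores_py; infer_instance

def pvWitness_get_highest_scores_py : Int × List (List Int) := (2, [[1, 2], [3, 1]])

def Spec_get_highest_scores_py (size : Int) (scores : List (List Int)) (out : List (Int × Int)) : Prop := out = get_highest_scores_py_alt size scores
instance (size : Int) (scores : List (List Int)) (out : List (Int × Int)) : Decidable (Spec_get_highest_scores_py size scores out) := by unfold Spec_get_highest_scores_py; infer_instance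

-- ===== CLAIM (what is proved, stated in full; the proofs are below) =====
def Claim_equal_get_highest_scores_py : Prop := ∀ (size : Int) (scores : List (List Int)), Dom_get_highest_scores_py size scores → Pre_get_highest_scores_py size scores → Spec_get_highest_scores_py size scores (get_highest_scores_py size scores)

-- ===== LEMMAS AND PROOFS =====

-- A's loop body as a step function over a coordinate pair
def pvStep (scores : List (List Int)) (st : List (Int × Int) × Int) (c : Int × Int) :
    List (Int × Int) × Int :=
  if pvCell scores c.1 c.2 = st.2 then (st.1 ++ [c], st.2)
  else if pvCell scores c.1 c.2 > st.2 then ([c], pvCell scores c.1 c.2)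
  else st

theorem pv_foldl_flatMap {α β σ : Type} (l : List α) (g : α → List β) (f : σ → β → σ)
    (init : σ) :
    (l.flatMap g).foldl f init = l.foldl (fun st x => (g x).foldl f st) init := by
  induction l generalizing init with
  | nil => rfl
  | cons a l ih => simp [List.flatMap_cons, List.foldl_append, ih]

-- the invariant of A's sweep: state = (matching coords so far, max(-100, values so far))
theorem pv_inv (scores : List (List Int)) (L : List (Int × Int)) :
    L.foldl (pvStep scores) ([], -100) =
      (L.filter (fun c =>
          pvCell scores c.1 c.2 = (L.map (fun c => pvCell scores c.1 c.2)).foldl max (-100)),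
       (L.map (fun c => pvCell scores c.1 c.2)).foldl max (-100)) := by
  induction L using List.reverseRecOn with
  | nil => simp
  | append_singleton L c ih =>
    have hM : ((L ++ [c]).map (fun c => pvCell scores c.1 c.2)).foldl max (-100) =
        max ((L.map (fun c => pvCell scores c.1 c.2)).foldl max (-100))
          (pvCell scores c.1 c.2) := by
      rw [List.map_append, List.foldl_append]; rfl
    rw [List.foldl_append, ih, List.foldl_cons, List.foldl_nil, hM]
    rcases lt_trichotomy (pvCell scores c.1 c.2)
        ((L.map (fun c => pvCell scores c.1 c.2)).foldl max (-100)) with hlt | heq | hgt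
    · rw [max_eq_left hlt.le]
      simp only [pvStep, if_neg hlt.ne, if_neg (not_lt.mpr hlt.le : ¬ _ > _)]
      rw [List.filter_append]
      simp [hlt.ne]
    · rw [heq, max_self]
      simp only [pvStep, if_pos heq]
      rw [List.filter_append]
      simp [heq]
    · have hne : pvCell scores c.1 c.2 ≠ _ := ne_of_gt hgt
      rw [max_eq_right hgt.le]
      simp only [pvStep, if_neg hne, if_pos hgt]
      have hgone : L.filter (fun d =>
          pvCell scores d.1 d.2 = pvCell scores c.1 c.2) = [] := by
        rw [List.filter_eq_nil_iff]
        intro d hd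
        have hle := (PySem.List.le_foldl_max (L.map (fun c => pvCell scores c.1 c.2))
          (-100)).2 (pvCell scores d.1 d.2) (List.mem_map_of_mem hd)
        simp only [decide_eq_true_eq]
        omega
      rw [List.filter_append, hgone]
      simp

-- A's nested loops are the single fold of pvStep over the row-major coordinate list
theorem pv_portA_eq (size : Int) (scores : List (List Int)) :
    get_highest_scores_py size scores =
      (((PySem.List.pyRange 0 size 1).flatMap (fun x =>
          (PySem.List.pyRange 0 size 1).map (fun y => (x, y)))).foldl
        (pvStep scores) ([], -100)).1 := by
  unfold get_highest_scores_py
  rw [pv_foldl_flatMap (f := pvStep scores)]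
  simp only [List.foldl_map, pvStep]

-- ===== VERDICT (by name: the statement is the Claim_ definition above) =====
theorem get_highest_scores_py_spec : Claim_equal_get_highest_scores_py := by
  intro size scores _ _
  unfold Spec_get_highest_scores_py get_highest_scores_py_alt
  rw [pv_portA_eq, pv_inv]
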